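-- pv_equiv track=rewrite | github.com/ankiwoong/Check_Io | ElectronicStation/FindSequence.py | checkio2
-- ===== SOURCE A (Python) =====
-- from itertools import groupby
--
-- def has_n_seq(l, n):
--     # 목록 'l'에 일련의 'n'이상의 일치 숫자가 있으면 True, 그렇지 않으면 False
--     if len(l) > 0:
--         return max(len(list(g)) for _, g in groupby(l)) >= n
--     else:
--         return False
--
-- def checkio2(matrix):
--     # 행
--     for row in matrix:
--         if has_n_seq(row, 4):
--             return True
--
--     # 열
--     for col in zip(*matrix):
--         if has_n_seq(col, 4):
--             return True
--
--     # 대각선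
--     n = len(matrix)
--     for p in range(2*n-1):
--         # 참고 : https://stackoverflow.com/questions/6313308/get-all-the-diagonals-in-a-matrix-list-of-lists-in-python
--         # 왼쪽 아래 오른쪽 위 대각선 확인
--         if has_n_seq([matrix[p-q][q] for q in range(max(0, p - n + 1), min(p, n - 1) + 1)], 4):
--             return True
--         # 왼쪽 상단에서 오른쪽 하단 대각선 확인
--         if has_n_seq([matrix[n-p+q-1][q] for q in range(max(0, p - n + 1), min(p, n - 1) + 1)], 4):
--             return True
--
--     # 아무것도 찾을 수 없음
--     return False
-- ===== SOURCE B (Python) =====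
-- def checkio2(matrix):
--     n = len(matrix)
--     for i in range(n):
--         row = matrix[i]
--         for j in range(len(row)):
--             v = row[j]
--             # horizontal run in the row
--             if j + 3 < len(row) and row[j + 1] == v and row[j + 2] == v and row[j + 3] == v:
--                 return True
--             if i + 3 < n:
--                 # vertical run down the column
--                 if all(j < len(matrix[i + k]) and matrix[i + k][j] == v for k in (1, 2, 3)):
--                     return True
--                 # diagonal runs stay inside the left n x n square (the board's diagonals)
--                 if j + 3 < n and all(j + k < len(matrix[i + k]) and matrix[i + k][j + k] == v for k in (1, 2, 3)):
--                     return True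
--                 if 3 <= j < n and all(j - k < len(matrix[i + k]) and matrix[i + k][j - k] == v for k in (1, 2, 3)):
--                     return True
--     return False
-- ===== Notes on version B (the rewrite author's own statement) =====
-- stated objective: alternative
-- what changed: Instead of extracting every row, zip-column and both diagonal families into lists and taking groupby run lengths, B scans the grid cell by cell and checks from each cell a 4-run to the right, straight down, and along the two diagonals of the left n-by-n square (the board's diagonals, exactly the lines A enumerates), returning True as soon as one is found.
-- outside the precondition, e.g. on checkio2([[1, 1, 1, 1], [2]]): A returns True, B returns True; on checkio2([[1, 2, 3, 4, 5], [1, 2, 3, 4], [5, 6, 7, 8], [1, 2, 3, 4]]): A returns False, B returns False; on checkio2([[1, 1, 1, 2], [2]]): A raises IndexError, B returns False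
import Mathlib
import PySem

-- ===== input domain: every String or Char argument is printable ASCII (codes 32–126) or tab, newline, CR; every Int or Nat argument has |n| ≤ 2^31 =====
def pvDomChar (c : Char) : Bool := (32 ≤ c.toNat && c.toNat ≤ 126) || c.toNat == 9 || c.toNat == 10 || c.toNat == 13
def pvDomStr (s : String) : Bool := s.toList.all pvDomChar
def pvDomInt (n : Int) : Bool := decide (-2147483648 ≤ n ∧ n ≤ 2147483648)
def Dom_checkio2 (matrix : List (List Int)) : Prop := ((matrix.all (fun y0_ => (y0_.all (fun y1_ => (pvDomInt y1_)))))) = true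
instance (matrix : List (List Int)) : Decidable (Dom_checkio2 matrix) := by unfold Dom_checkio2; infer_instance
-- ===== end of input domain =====

-- B replaces A's line extraction (rows, zip-columns, groupby run lengths on both diagonal families) by a
-- single cell-by-cell scan checking a 4-run right, down, and along the two diagonals of the left n×n
-- square — the same lines A enumerates (objective: alternative).

-- ===== PORT A =====
-- lengths of the groups of itertools.groupby(l): run lengths of consecutive equal values
def runLens : List Int → List Nat
  | [] => []
  | [_] => [1]
  | x :: y :: rest =>
    match runLens (y :: rest) with
    | c :: ls => if x = y then (c + 1) :: ls else 1 :: c :: ls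
    | [] => [1]

def hasNSeq (l : List Int) (n : Nat) : Bool :=
  if 0 < l.length then decide (n ≤ (runLens l).foldr max 0) else false

-- zip(*matrix): columns truncated to the shortest row
def pyZipStar (matrix : List (List Int)) : List (List Int) :=
  match matrix with
  | [] => []
  | _ :: _ =>
    let m := ((matrix.map List.length).min?).getD 0
    (List.range m).map (fun j => matrix.map (fun row => row.getD j 0))

-- matrix[i][j] for Int indices (exact inside Pre_, where every access is in range)
def diagIdx (matrix : List (List Int)) (i j : Int) : Int :=
  ((PySem.List.pyGet? matrix i).bind (fun row => PySem.List.pyGet? row j)).getD 0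

def checkio2 (matrix : List (List Int)) : Bool :=
  (matrix.any (fun row => hasNSeq row 4)) ||
  ((pyZipStar matrix).any (fun col => hasNSeq col 4)) ||
  (let n : Int := matrix.length
   (PySem.List.pyRange 0 (2 * n - 1) 1).any (fun p =>
     hasNSeq ((PySem.List.pyRange (max 0 (p - n + 1)) (min p (n - 1) + 1) 1).map
       (fun q => diagIdx matrix (p - q) q)) 4 ||
     hasNSeq ((PySem.List.pyRange (max 0 (p - n + 1)) (min p (n - 1) + 1) 1).map
       (fun q => diagIdx matrix (n - p + q - 1) q)) 4))

-- ===== PORT B =====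
-- 'cj < len(matrix[ci]) and matrix[ci][cj] == v' of Source B's all(...) steps
def bCell (matrix : List (List Int)) (v : Int) (ci cj : Nat) : Bool :=
  decide (cj < (matrix.getD ci []).length) && ((matrix.getD ci []).getD cj 0 == v)

-- the horizontal-run test of Source B at (i, j)
def hB (matrix : List (List Int)) (i j : Nat) : Bool :=
  let row := matrix.getD i []
  let v := row.getD j 0
  decide (j + 3 < row.length) && (row.getD (j + 1) 0 == v) &&
    (row.getD (j + 2) 0 == v) && (row.getD (j + 3) 0 == v)

-- the vertical-run test (the all(...) over k in (1,2,3))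
def vB (matrix : List (List Int)) (i j : Nat) : Bool :=
  let v := (matrix.getD i []).getD j 0
  bCell matrix v (i + 1) j && bCell matrix v (i + 2) j && bCell matrix v (i + 3) j

-- the down-right diagonal test, inside the left n×n square
def dB (matrix : List (List Int)) (i j : Nat) : Bool :=
  let v := (matrix.getD i []).getD j 0
  decide (j + 3 < matrix.length) && (bCell matrix v (i + 1) (j + 1) &&
    bCell matrix v (i + 2) (j + 2) && bCell matrix v (i + 3) (j + 3))

-- the down-left diagonal test, inside the left n×n square
def aB (matrix : List (List Int)) (i j : Nat) : Bool :=
  let v := (matrix.getD i []).getD j 0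
  decide (3 ≤ j) && decide (j < matrix.length) && (bCell matrix v (i + 1) (j - 1) &&
    bCell matrix v (i + 2) (j - 2) && bCell matrix v (i + 3) (j - 3))

def checkio2_alt (matrix : List (List Int)) : Bool :=
  (List.range matrix.length).any (fun i =>
    (List.range (matrix.getD i []).length).any (fun j =>
      hB matrix i j ||
      (decide (i + 3 < matrix.length) &&
        (vB matrix i j || dB matrix i j || aB matrix i j))))

-- ===== PRECONDITION & SPEC =====
-- Pre_ admits the task's natural grid domain — rectangular matrices at least as wide as tall (all square
-- boards included) — plus grids of at most 3 rows whose rows are at least as long as the matrix is tall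
-- (there only horizontal runs are possible). Outside it: on a matrix with a row shorter than the row
-- count A's square diagonal indexing raises IndexError unless an earlier check happens to return True
-- first, and ragged rows are malformed grid input on which A's zip-truncated column set is an accident
-- of the shortest row.
def Pre_checkio2 (matrix : List (List Int)) : Prop :=
  ((∀ row ∈ matrix, row.length = (matrix.headD []).length) ∧
    matrix.length ≤ (matrix.headD []).length) ∨
  (matrix.length ≤ 3 ∧ ∀ row ∈ matrix, matrix.length ≤ row.length)
instance (matrix : List (List Int)) : Decidable (Pre_checkio2 matrix) := by
  unfold Pre_checkio2; infer_instance

def pvWitness_checkio2 : List (List Int) := [[1, 2], [3, 4]]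

def Spec_checkio2 (matrix : List (List Int)) (out : Bool) : Prop := out = checkio2_alt matrix
instance (matrix : List (List Int)) (out : Bool) : Decidable (Spec_checkio2 matrix out) := by
  unfold Spec_checkio2; infer_instance

-- ===== CLAIM (what is proved, stated in full; the proofs are below) =====
def Claim_equal_checkio2 : Prop :=
  ∀ (matrix : List (List Int)), Dom_checkio2 matrix → Pre_checkio2 matrix →
    Spec_checkio2 matrix (checkio2 matrix)

-- ===== LEMMAS AND PROOFS =====

-- the cell (i, j) of the grid
def cell (m : List (List Int)) (i j : Nat) : Int := (m.getD i []).getD j 0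

-- four consecutive equal values starting at position k
def Win4 (l : List Int) (k : Nat) : Prop :=
  k + 3 < l.length ∧ l.getD k 0 = l.getD (k + 1) 0 ∧
    l.getD k 0 = l.getD (k + 2) 0 ∧ l.getD k 0 = l.getD (k + 3) 0

-- the four kinds of 4-in-a-line segments of the grid (columns bounded by the width W)
def Hrun (m : List (List Int)) (i j : Nat) : Prop :=
  i < m.length ∧ j + 3 < (m.getD i []).length ∧
    cell m i j = cell m i (j + 1) ∧ cell m i j = cell m i (j + 2) ∧ cell m i j = cell m i (j + 3)
def Vrun (m : List (List Int)) (W i j : Nat) : Prop :=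
  i + 3 < m.length ∧ j < W ∧
    cell m i j = cell m (i + 1) j ∧ cell m i j = cell m (i + 2) j ∧ cell m i j = cell m (i + 3) j
def Drun (m : List (List Int)) (i j : Nat) : Prop :=
  i + 3 < m.length ∧ j + 3 < m.length ∧
    cell m i j = cell m (i + 1) (j + 1) ∧ cell m i j = cell m (i + 2) (j + 2) ∧
    cell m i j = cell m (i + 3) (j + 3)
def Arun (m : List (List Int)) (i j : Nat) : Prop :=
  i + 3 < m.length ∧ 3 ≤ j ∧ j < m.length ∧
    cell m i j = cell m (i + 1) (j - 1) ∧ cell m i j = cell m (i + 2) (j - 2) ∧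
    cell m i j = cell m (i + 3) (j - 3)

-- head run length of a list
def hrL : List Int → Nat
  | [] => 0
  | [_] => 1
  | x :: y :: rest => if x = y then hrL (y :: rest) + 1 else 1

lemma hrL_pos (x : Int) (xs : List Int) : 1 ≤ hrL (x :: xs) := by
  cases xs <;> simp [hrL] <;> split_ifs <;> omega

lemma runLens_head (x : Int) (xs : List Int) :
    ∃ ls, runLens (x :: xs) = hrL (x :: xs) :: ls := by
  induction xs generalizing x with
  | nil => exact ⟨[], rfl⟩
  | cons y t ih =>
    obtain ⟨ls, h⟩ := ih y
    by_cases hxy : x = y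
    · exact ⟨ls, by simp [runLens, h, hrL, hxy]⟩
    · exact ⟨hrL (y :: t) :: ls, by simp [runLens, h, hrL, hxy]⟩

lemma hrL4_iff (l : List Int) : 4 ≤ hrL l ↔ Win4 l 0 := by
  rcases l with _ | ⟨a, _ | ⟨b, _ | ⟨c, _ | ⟨d, t⟩⟩⟩⟩
  · simp [hrL, Win4]
  · simp [hrL, Win4]
  · simp [hrL, Win4]; split_ifs <;> omega
  · simp [hrL, Win4]; split_ifs <;> omega
  · have hd := hrL_pos d t
    by_cases h1 : a = b <;> by_cases h2 : b = c <;> by_cases h3 : c = d <;>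
      simp [hrL, Win4, h1, h2, h3] <;> first | omega | (split_ifs <;> omega)

lemma win4_succ (x : Int) (xs : List Int) (k : Nat) :
    Win4 (x :: xs) (k + 1) ↔ Win4 xs k := by
  simp [Win4]
  intros; omega

lemma win4_shift (x : Int) (xs : List Int) :
    (∃ k, Win4 (x :: xs) k) ↔ Win4 (x :: xs) 0 ∨ ∃ k, Win4 xs k := by
  constructor
  · rintro ⟨k, hk⟩
    cases k with
    | zero => exact Or.inl hk
    | succ k => exact Or.inr ⟨k, (win4_succ x xs k).mp hk⟩
  · rintro (h | ⟨k, hk⟩)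
    · exact ⟨0, h⟩
    · exact ⟨k + 1, (win4_succ x xs k).mpr hk⟩

lemma maxRun_iff (l : List Int) :
    4 ≤ (runLens l).foldr max 0 ↔ ∃ k, Win4 l k := by
  induction l with
  | nil => simp [runLens, Win4]
  | cons x xs ih =>
    cases xs with
    | nil => simp [runLens, Win4]
    | cons y t =>
      obtain ⟨ls, h⟩ := runLens_head y t
      have hx : runLens (x :: y :: t) =
          if x = y then (hrL (y :: t) + 1) :: ls else 1 :: hrL (y :: t) :: ls := by
        simp [runLens, h]
      rw [h] at ih
      rw [win4_shift, ← hrL4_iff, hx, ← ih]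
      by_cases hxy : x = y
      · have hh : hrL (x :: y :: t) = hrL (y :: t) + 1 := by simp [hrL, hxy]
        rw [if_pos hxy, hh]
        simp only [List.foldr_cons]
        simp only [le_max_iff]
        omega
      · have hh : hrL (x :: y :: t) = 1 := by simp [hrL, hxy]
        rw [if_neg hxy, hh]
        simp only [List.foldr_cons]
        simp only [le_max_iff]
        try omega

lemma hasNSeq_iff (l : List Int) : hasNSeq l 4 = true ↔ ∃ k, Win4 l k := by
  unfold hasNSeq
  split_ifs with h
  · simpa using maxRun_iff l
  · have : l = [] := by cases l <;> simp_all
    subst this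
    simp [Win4]

lemma rows_iff (m : List (List Int)) :
    (m.any (fun row => hasNSeq row 4)) = true ↔ ∃ i j, Hrun m i j := by
  simp only [List.any_eq_true]
  constructor
  · rintro ⟨row, hmem, hrow⟩
    obtain ⟨i, hi, rfl⟩ := List.mem_iff_getElem.mp hmem
    obtain ⟨k, hk1, hk2, hk3, hk4⟩ := (hasNSeq_iff _).mp hrow
    refine ⟨i, k, hi, ?_, ?_, ?_, ?_⟩
    · rw [List.getD_eq_getElem m [] hi]; exact hk1
    all_goals (simp only [cell, List.getD_eq_getElem m [] hi]; assumption)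
  · rintro ⟨i, k, hi, hk, e1, e2, e3⟩
    rw [List.getD_eq_getElem m [] hi] at hk
    refine ⟨m[i], List.getElem_mem hi, (hasNSeq_iff _).mpr ⟨k, hk, ?_, ?_, ?_⟩⟩
    all_goals
      (simp only [cell, List.getD_eq_getElem m [] hi] at e1 e2 e3; assumption)

lemma rowlen (m : List (List Int)) (W : Nat) (hrect : ∀ row ∈ m, row.length = W)
    (i : Nat) (hi : i < m.length) : (m.getD i []).length = W := by
  rw [List.getD_eq_getElem m [] hi]
  exact hrect _ (List.getElem_mem hi)

lemma cols_iff (m : List (List Int)) (W : Nat) (hrect : ∀ row ∈ m, row.length = W) :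
    ((pyZipStar m).any (fun col => hasNSeq col 4)) = true ↔ ∃ i j, Vrun m W i j := by
  cases m with
  | nil => simp [pyZipStar, Vrun]
  | cons r rest =>
    have hmin : (((r :: rest).map List.length).min?) = some W := by
      rw [List.min?_eq_some_iff]
      constructor
      · exact List.mem_map.mpr ⟨r, by simp, hrect r (by simp)⟩
      · intro b hb
        obtain ⟨row, hrow, rfl⟩ := List.mem_map.mp hb
        rw [hrect row hrow]
    have hz : pyZipStar (r :: rest) =
        (List.range W).map
          (fun j => (r :: rest).map (fun row => row.getD j 0)) := by
      show (List.range (((((r :: rest).map List.length).min?)).getD 0)).map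
          (fun j => (r :: rest).map (fun row => row.getD j 0)) = _
      rw [hmin]; rfl
    have hget : ∀ (j i : Nat), i < (r :: rest).length →
        ((r :: rest).map (fun row => row.getD j 0)).getD i 0 = cell (r :: rest) i j := by
      intro j i hi
      rw [List.getD_eq_getElem _ 0 (by simpa using hi), List.getElem_map]
      simp [cell, List.getElem?_eq_getElem hi]
    rw [hz]
    simp only [List.any_eq_true, List.mem_map, List.mem_range]
    constructor
    · rintro ⟨col, ⟨j, hj, rfl⟩, hcol⟩
      obtain ⟨k, hk1, hk2, hk3, hk4⟩ := (hasNSeq_iff _).mp hcol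
      rw [List.length_map] at hk1
      refine ⟨k, j, by omega, hj, ?_, ?_, ?_⟩ <;>
        (rw [← hget j _ (by omega), ← hget j _ (by omega)]; assumption)
    · rintro ⟨i, j, hi, hj, e1, e2, e3⟩
      refine ⟨_, ⟨j, hj, rfl⟩, (hasNSeq_iff _).mpr ⟨i, ?_, ?_, ?_, ?_⟩⟩
      · rw [List.length_map]; omega
      all_goals
        (rw [hget j _ (by omega), hget j _ (by omega)]; assumption)

lemma diag_cell (m : List (List Int)) (W : Nat) (hrect : ∀ row ∈ m, row.length = W)
    (hWn : m.length ≤ W) (i j : Int)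
    (h0 : 0 ≤ i) (h1 : i < (m.length : Int)) (h2 : 0 ≤ j) (h3 : j < (m.length : Int)) :
    diagIdx m i j = cell m i.toNat j.toNat := by
  have hi' : i.toNat < m.length := by omega
  have hrow : m[i.toNat].length = W := hrect _ (List.getElem_mem hi')
  have hj' : j.toNat < m[i.toNat].length := by rw [hrow]; omega
  unfold diagIdx
  rw [PySem.List.pyGet?_eq_some_getElem m h0 h1, Option.bind_some,
    PySem.List.pyGet?_eq_some_getElem _ h2 (by have := hj'; omega)]
  simp [cell, List.getElem?_eq_getElem hi', List.getElem?_eq_getElem hj']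

-- translate an Int-indexed diagonal access into a Nat-indexed cell
lemma diag_cellN (m : List (List Int)) (W : Nat) (hrect : ∀ row ∈ m, row.length = W)
    (hWn : m.length ≤ W) (x y : Int) (u v : Nat)
    (hx : x = (u : Int)) (hy : y = (v : Int)) (hu : u < m.length) (hv : v < m.length) :
    diagIdx m x y = cell m u v := by
  subst hx hy
  rw [diag_cell m W hrect hWn _ _ (by omega) (by exact_mod_cast hu) (by omega) (by exact_mod_cast hv)]
  simp

lemma win_map (g : Int → Int) (a b : Int) (k : Nat) :
    Win4 ((PySem.List.pyRange a b 1).map g) k ↔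
      (a + k + 3 < b ∧ g (a + k) = g (a + k + 1) ∧
        g (a + k) = g (a + k + 2) ∧ g (a + k) = g (a + k + 3)) := by
  have hlen : ((PySem.List.pyRange a b 1).map g).length = (b - a).toNat := by
    simp [PySem.List.length_pyRange_one]
  have hg : ∀ s : Nat, s < (b - a).toNat →
      ((PySem.List.pyRange a b 1).map g).getD s 0 = g (a + s) := by
    intro s hs
    have h := PySem.List.pyGetD_map_pyRange_one g a b s 0 hs
    rwa [PySem.List.pyGetD_natCast] at h
  have c1 : (a + ((k + 1 : Nat) : Int)) = a + k + 1 := by push_cast; ring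
  have c2 : (a + ((k + 2 : Nat) : Int)) = a + k + 2 := by push_cast; ring
  have c3 : (a + ((k + 3 : Nat) : Int)) = a + k + 3 := by push_cast; ring
  unfold Win4
  rw [hlen]
  constructor
  · rintro ⟨h1, h2, h3, h4⟩
    rw [hg k (by omega), hg (k + 1) (by omega), c1] at h2
    rw [hg k (by omega), hg (k + 2) (by omega), c2] at h3
    rw [hg k (by omega), hg (k + 3) (by omega), c3] at h4
    exact ⟨by omega, h2, h3, h4⟩
  · rintro ⟨h1, h2, h3, h4⟩
    refine ⟨by omega, ?_, ?_, ?_⟩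
    · rw [hg k (by omega), hg (k + 1) (by omega), c1]; exact h2
    · rw [hg k (by omega), hg (k + 2) (by omega), c2]; exact h3
    · rw [hg k (by omega), hg (k + 3) (by omega), c3]; exact h4

lemma diags_iff (m : List (List Int)) (W : Nat) (hrect : ∀ row ∈ m, row.length = W)
    (hWn : m.length ≤ W) :
    ((PySem.List.pyRange 0 (2 * (m.length : Int) - 1) 1).any (fun p =>
      hasNSeq ((PySem.List.pyRange (max 0 (p - m.length + 1)) (min p ((m.length : Int) - 1) + 1) 1).map
        (fun q => diagIdx m (p - q) q)) 4 ||
      hasNSeq ((PySem.List.pyRange (max 0 (p - m.length + 1)) (min p ((m.length : Int) - 1) + 1) 1).map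
        (fun q => diagIdx m ((m.length : Int) - p + q - 1) q)) 4)) = true ↔
    (∃ i j, Arun m i j) ∨ (∃ i j, Drun m i j) := by
  simp only [List.any_eq_true, PySem.List.mem_pyRange_one, Bool.or_eq_true]
  constructor
  · rintro ⟨p, hp, h | h⟩
    · left
      obtain ⟨k, hk⟩ := (hasNSeq_iff _).mp h
      rw [win_map] at hk
      obtain ⟨hb, e1, e2, e3⟩ := hk
      have ha0 : (0 : Int) ≤ max 0 (p - m.length + 1) := le_max_left _ _
      have ham : p - (m.length : Int) + 1 ≤ max 0 (p - m.length + 1) := le_max_right _ _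
      have hbm : min p ((m.length : Int) - 1) ≤ p := min_le_left _ _
      have hbn : min p ((m.length : Int) - 1) ≤ (m.length : Int) - 1 := min_le_right _ _
      set a := max 0 (p - (m.length : Int) + 1) with hadef
      set q0 := a + (k : Int) with hq0
      refine ⟨(p - q0 - 3).toNat, (q0 + 3).toNat, by omega, by omega, by omega, ?_, ?_, ?_⟩
      · rw [← diag_cellN m W hrect hWn (p - (q0 + 3)) (q0 + 3) ((p - q0 - 3).toNat) ((q0 + 3).toNat)
            (by omega) (by omega) (by omega) (by omega),
          ← diag_cellN m W hrect hWn (p - (q0 + 2)) (q0 + 2) ((p - q0 - 3).toNat + 1) ((q0 + 3).toNat - 1)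
            (by omega) (by omega) (by omega) (by omega)]
        exact e3.symm.trans e2
      · rw [← diag_cellN m W hrect hWn (p - (q0 + 3)) (q0 + 3) ((p - q0 - 3).toNat) ((q0 + 3).toNat)
            (by omega) (by omega) (by omega) (by omega),
          ← diag_cellN m W hrect hWn (p - (q0 + 1)) (q0 + 1) ((p - q0 - 3).toNat + 2) ((q0 + 3).toNat - 2)
            (by omega) (by omega) (by omega) (by omega)]
        exact e3.symm.trans e1
      · rw [← diag_cellN m W hrect hWn (p - (q0 + 3)) (q0 + 3) ((p - q0 - 3).toNat) ((q0 + 3).toNat)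
            (by omega) (by omega) (by omega) (by omega),
          ← diag_cellN m W hrect hWn (p - q0) q0 ((p - q0 - 3).toNat + 3) ((q0 + 3).toNat - 3)
            (by omega) (by omega) (by omega) (by omega)]
        exact e3.symm
    · right
      obtain ⟨k, hk⟩ := (hasNSeq_iff _).mp h
      rw [win_map] at hk
      obtain ⟨hb, e1, e2, e3⟩ := hk
      have ha0 : (0 : Int) ≤ max 0 (p - m.length + 1) := le_max_left _ _
      have ham : p - (m.length : Int) + 1 ≤ max 0 (p - m.length + 1) := le_max_right _ _
      have hbm : min p ((m.length : Int) - 1) ≤ p := min_le_left _ _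
      have hbn : min p ((m.length : Int) - 1) ≤ (m.length : Int) - 1 := min_le_right _ _
      set a := max 0 (p - (m.length : Int) + 1) with hadef
      set q0 := a + (k : Int) with hq0
      refine ⟨((m.length : Int) - p - 1 + q0).toNat, q0.toNat, by omega, by omega, ?_, ?_, ?_⟩
      · rw [← diag_cellN m W hrect hWn ((m.length : Int) - p + q0 - 1) q0
            (((m.length : Int) - p - 1 + q0).toNat) q0.toNat
            (by omega) (by omega) (by omega) (by omega),
          ← diag_cellN m W hrect hWn ((m.length : Int) - p + (q0 + 1) - 1) (q0 + 1)
            (((m.length : Int) - p - 1 + q0).toNat + 1) (q0.toNat + 1)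
            (by omega) (by omega) (by omega) (by omega)]
        exact e1
      · rw [← diag_cellN m W hrect hWn ((m.length : Int) - p + q0 - 1) q0
            (((m.length : Int) - p - 1 + q0).toNat) q0.toNat
            (by omega) (by omega) (by omega) (by omega),
          ← diag_cellN m W hrect hWn ((m.length : Int) - p + (q0 + 2) - 1) (q0 + 2)
            (((m.length : Int) - p - 1 + q0).toNat + 2) (q0.toNat + 2)
            (by omega) (by omega) (by omega) (by omega)]
        exact e2
      · rw [← diag_cellN m W hrect hWn ((m.length : Int) - p + q0 - 1) q0
            (((m.length : Int) - p - 1 + q0).toNat) q0.toNat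
            (by omega) (by omega) (by omega) (by omega),
          ← diag_cellN m W hrect hWn ((m.length : Int) - p + (q0 + 3) - 1) (q0 + 3)
            (((m.length : Int) - p - 1 + q0).toNat + 3) (q0.toNat + 3)
            (by omega) (by omega) (by omega) (by omega)]
        exact e3
  · rintro (⟨i, j, h1, h2, h3, e1, e2, e3⟩ | ⟨i, j, h1, h2, e1, e2, e3⟩)
    · refine ⟨(i : Int) + j, ⟨by omega, by omega⟩, Or.inl ?_⟩
      apply (hasNSeq_iff _).mpr
      have ha0 : (0 : Int) ≤ max 0 ((i : Int) + j - m.length + 1) := le_max_left _ _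
      have haj : max 0 ((i : Int) + j - m.length + 1) ≤ (j : Int) - 3 :=
        max_le (by omega) (by omega)
      have hmin : (j : Int) ≤ min ((i : Int) + j) ((m.length : Int) - 1) :=
        le_min (by omega) (by omega)
      set a := max 0 ((i : Int) + j - (m.length : Int) + 1) with hadef
      refine ⟨((j : Int) - 3 - a).toNat, ?_⟩
      rw [win_map]
      have hak : a + ((((j : Int) - 3 - a).toNat : Int)) = (j : Int) - 3 := by omega
      rw [hak]
      refine ⟨by omega, ?_, ?_, ?_⟩
      · rw [diag_cellN m W hrect hWn ((i : Int) + j - ((j : Int) - 3)) ((j : Int) - 3) (i + 3) (j - 3)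
            (by omega) (by omega) (by omega) (by omega),
          diag_cellN m W hrect hWn ((i : Int) + j - ((j : Int) - 3 + 1)) ((j : Int) - 3 + 1) (i + 2) (j - 2)
            (by omega) (by omega) (by omega) (by omega)]
        exact e3.symm.trans e2
      · rw [diag_cellN m W hrect hWn ((i : Int) + j - ((j : Int) - 3)) ((j : Int) - 3) (i + 3) (j - 3)
            (by omega) (by omega) (by omega) (by omega),
          diag_cellN m W hrect hWn ((i : Int) + j - ((j : Int) - 3 + 2)) ((j : Int) - 3 + 2) (i + 1) (j - 1)
            (by omega) (by omega) (by omega) (by omega)]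
        exact e3.symm.trans e1
      · rw [diag_cellN m W hrect hWn ((i : Int) + j - ((j : Int) - 3)) ((j : Int) - 3) (i + 3) (j - 3)
            (by omega) (by omega) (by omega) (by omega),
          diag_cellN m W hrect hWn ((i : Int) + j - ((j : Int) - 3 + 3)) ((j : Int) - 3 + 3) i j
            (by omega) (by omega) (by omega) (by omega)]
        exact e3.symm
    · refine ⟨(m.length : Int) - 1 - i + j, ⟨by omega, by omega⟩, Or.inr ?_⟩
      apply (hasNSeq_iff _).mpr
      have ha0 : (0 : Int) ≤ max 0 ((m.length : Int) - 1 - i + j - m.length + 1) := le_max_left _ _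
      have haj : max 0 ((m.length : Int) - 1 - i + j - m.length + 1) ≤ (j : Int) :=
        max_le (by omega) (by omega)
      have hmin : (j : Int) + 3 ≤ min ((m.length : Int) - 1 - i + j) ((m.length : Int) - 1) :=
        le_min (by omega) (by omega)
      set a := max 0 ((m.length : Int) - 1 - i + j - (m.length : Int) + 1) with hadef
      refine ⟨((j : Int) - a).toNat, ?_⟩
      rw [win_map]
      have hak : a + ((((j : Int) - a).toNat : Int)) = (j : Int) := by omega
      rw [hak]
      refine ⟨by omega, ?_, ?_, ?_⟩
      · rw [diag_cellN m W hrect hWn ((m.length : Int) - ((m.length : Int) - 1 - i + j) + (j : Int) - 1) (j : Int) i j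
            (by omega) (by omega) (by omega) (by omega),
          diag_cellN m W hrect hWn ((m.length : Int) - ((m.length : Int) - 1 - i + j) + ((j : Int) + 1) - 1) ((j : Int) + 1) (i + 1) (j + 1)
            (by omega) (by omega) (by omega) (by omega)]
        exact e1
      · rw [diag_cellN m W hrect hWn ((m.length : Int) - ((m.length : Int) - 1 - i + j) + (j : Int) - 1) (j : Int) i j
            (by omega) (by omega) (by omega) (by omega),
          diag_cellN m W hrect hWn ((m.length : Int) - ((m.length : Int) - 1 - i + j) + ((j : Int) + 2) - 1) ((j : Int) + 2) (i + 2) (j + 2)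
            (by omega) (by omega) (by omega) (by omega)]
        exact e2
      · rw [diag_cellN m W hrect hWn ((m.length : Int) - ((m.length : Int) - 1 - i + j) + (j : Int) - 1) (j : Int) i j
            (by omega) (by omega) (by omega) (by omega),
          diag_cellN m W hrect hWn ((m.length : Int) - ((m.length : Int) - 1 - i + j) + ((j : Int) + 3) - 1) ((j : Int) + 3) (i + 3) (j + 3)
            (by omega) (by omega) (by omega) (by omega)]
        exact e3

lemma bCell_iff (m : List (List Int)) (v : Int) (ci cj : Nat) :
    bCell m v ci cj = true ↔ cj < (m.getD ci []).length ∧ cell m ci cj = v := by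
  simp [bCell, cell]

lemma hB_iff (m : List (List Int)) (i j : Nat) (hi : i < m.length) :
    hB m i j = true ↔ Hrun m i j := by
  simp only [hB, Hrun, cell, Bool.and_eq_true, decide_eq_true_eq, beq_iff_eq]
  constructor
  · rintro ⟨⟨⟨h1, h2⟩, h3⟩, h4⟩
    exact ⟨hi, h1, h2.symm, h3.symm, h4.symm⟩
  · rintro ⟨-, h1, h2, h3, h4⟩
    exact ⟨⟨⟨h1, h2.symm⟩, h3.symm⟩, h4.symm⟩

lemma vB_iff (m : List (List Int)) (W : Nat) (hrect : ∀ row ∈ m, row.length = W)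
    (i j : Nat) (hi : i + 3 < m.length) :
    vB m i j = true ↔ (j < W ∧
      cell m i j = cell m (i + 1) j ∧ cell m i j = cell m (i + 2) j ∧
      cell m i j = cell m (i + 3) j) := by
  have l1 := rowlen m W hrect (i + 1) (by omega)
  have l2 := rowlen m W hrect (i + 2) (by omega)
  have l3 := rowlen m W hrect (i + 3) (by omega)
  simp only [vB, Bool.and_eq_true, bCell_iff, l1, l2, l3]
  constructor
  · rintro ⟨⟨⟨hj1, e1⟩, _, e2⟩, _, e3⟩
    exact ⟨hj1, e1.symm, e2.symm, e3.symm⟩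
  · rintro ⟨hj, e1, e2, e3⟩
    exact ⟨⟨⟨hj, e1.symm⟩, hj, e2.symm⟩, hj, e3.symm⟩

lemma dB_iff (m : List (List Int)) (W : Nat) (hrect : ∀ row ∈ m, row.length = W)
    (hWn : m.length ≤ W) (i j : Nat) (hi : i + 3 < m.length) :
    dB m i j = true ↔ Drun m i j := by
  have l1 := rowlen m W hrect (i + 1) (by omega)
  have l2 := rowlen m W hrect (i + 2) (by omega)
  have l3 := rowlen m W hrect (i + 3) (by omega)
  simp only [dB, Drun, Bool.and_eq_true, bCell_iff, decide_eq_true_eq, l1, l2, l3]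
  constructor
  · rintro ⟨hj, ⟨⟨_, e1⟩, _, e2⟩, _, e3⟩
    exact ⟨hi, hj, e1.symm, e2.symm, e3.symm⟩
  · rintro ⟨-, hj, e1, e2, e3⟩
    exact ⟨hj, ⟨⟨by omega, e1.symm⟩, by omega, e2.symm⟩, by omega, e3.symm⟩

lemma aB_iff (m : List (List Int)) (W : Nat) (hrect : ∀ row ∈ m, row.length = W)
    (hWn : m.length ≤ W) (i j : Nat) (hi : i + 3 < m.length) :
    aB m i j = true ↔ Arun m i j := by
  have l1 := rowlen m W hrect (i + 1) (by omega)
  have l2 := rowlen m W hrect (i + 2) (by omega)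
  have l3 := rowlen m W hrect (i + 3) (by omega)
  simp only [aB, Arun, Bool.and_eq_true, bCell_iff, decide_eq_true_eq, l1, l2, l3]
  constructor
  · rintro ⟨⟨h3j, hjn⟩, ⟨⟨_, e1⟩, _, e2⟩, _, e3⟩
    exact ⟨hi, h3j, hjn, e1.symm, e2.symm, e3.symm⟩
  · rintro ⟨-, h3j, hjn, e1, e2, e3⟩
    exact ⟨⟨h3j, hjn⟩, ⟨⟨by omega, e1.symm⟩, by omega, e2.symm⟩, by omega, e3.symm⟩

lemma alt_iff (m : List (List Int)) (W : Nat) (hrect : ∀ row ∈ m, row.length = W)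
    (hWn : m.length ≤ W) :
    checkio2_alt m = true ↔
      (∃ i j, Hrun m i j) ∨ (∃ i j, Vrun m W i j) ∨ (∃ i j, Drun m i j) ∨ (∃ i j, Arun m i j) := by
  unfold checkio2_alt
  simp only [List.any_eq_true, List.mem_range, Bool.or_eq_true, Bool.and_eq_true,
    decide_eq_true_eq]
  constructor
  · rintro ⟨i, hi, j, hj, hH | ⟨hi3, (hV | hD) | hA⟩⟩
    · exact Or.inl ⟨i, j, (hB_iff m i j hi).mp hH⟩
    · obtain ⟨hjW, e⟩ := (vB_iff m W hrect i j hi3).mp hV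
      exact Or.inr (Or.inl ⟨i, j, hi3, hjW, e⟩)
    · exact Or.inr (Or.inr (Or.inl ⟨i, j, (dB_iff m W hrect hWn i j hi3).mp hD⟩))
    · exact Or.inr (Or.inr (Or.inr ⟨i, j, (aB_iff m W hrect hWn i j hi3).mp hA⟩))
  · have hjlen : ∀ i j : Nat, i < m.length → j < W → j < (m.getD i []).length := by
      intro i j hi hj
      rw [rowlen m W hrect i hi]; exact hj
    rintro (⟨i, j, h⟩ | ⟨i, j, h⟩ | ⟨i, j, h⟩ | ⟨i, j, h⟩)
    · exact ⟨i, h.1, j, by have := h.2.1; omega, Or.inl ((hB_iff m i j h.1).mpr h)⟩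
    · have hi3 := h.1
      have hjW := h.2.1
      exact ⟨i, by omega, j, hjlen i j (by omega) hjW,
        Or.inr ⟨hi3, Or.inl (Or.inl ((vB_iff m W hrect i j hi3).mpr ⟨hjW, h.2.2⟩))⟩⟩
    · have hi3 := h.1
      have hjn := h.2.1
      exact ⟨i, by omega, j, hjlen i j (by omega) (by omega),
        Or.inr ⟨hi3, Or.inl (Or.inr ((dB_iff m W hrect hWn i j hi3).mpr h))⟩⟩
    · have hi3 := h.1
      have hjn := h.2.2.1
      exact ⟨i, by omega, j, hjlen i j (by omega) (by omega),
        Or.inr ⟨hi3, Or.inr ((aB_iff m W hrect hWn i j hi3).mpr h)⟩⟩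

lemma hasNSeq_short (l : List Int) (h : l.length < 4) : hasNSeq l 4 = false := by
  rw [← Bool.not_eq_true, hasNSeq_iff]
  rintro ⟨k, hk, -⟩
  omega

lemma alt_iff_small (m : List (List Int)) (hn : m.length ≤ 3) :
    checkio2_alt m = true ↔ ∃ i j, Hrun m i j := by
  unfold checkio2_alt
  simp only [List.any_eq_true, List.mem_range, Bool.or_eq_true, Bool.and_eq_true,
    decide_eq_true_eq]
  constructor
  · rintro ⟨i, hi, j, hj, hH | ⟨hi3, -⟩⟩
    · exact ⟨i, j, (hB_iff m i j hi).mp hH⟩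
    · omega
  · rintro ⟨i, j, hH⟩
    exact ⟨i, hH.1, j, by have := hH.2.1; omega, Or.inl ((hB_iff m i j hH.1).mpr hH)⟩

lemma cols_false (m : List (List Int)) (hn : m.length ≤ 3) :
    ((pyZipStar m).any (fun col => hasNSeq col 4)) = false := by
  rw [List.any_eq_false]
  intro col hcol
  cases m with
  | nil => simp [pyZipStar] at hcol
  | cons r rest =>
    have : ∃ j, col = (r :: rest).map (fun row => row.getD j 0) := by
      simp only [pyZipStar, List.mem_map, List.mem_range] at hcol
      obtain ⟨j, -, rfl⟩ := hcol
      exact ⟨j, rfl⟩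
    obtain ⟨j, rfl⟩ := this
    have hf := hasNSeq_short ((r :: rest).map fun row => row.getD j 0)
      (by simp only [List.length_map]; omega)
    simp only [Bool.not_eq_true]
    exact hf

lemma diags_false (m : List (List Int)) (hn : m.length ≤ 3) :
    ((PySem.List.pyRange 0 (2 * (m.length : Int) - 1) 1).any (fun p =>
      hasNSeq ((PySem.List.pyRange (max 0 (p - m.length + 1)) (min p ((m.length : Int) - 1) + 1) 1).map
        (fun q => diagIdx m (p - q) q)) 4 ||
      hasNSeq ((PySem.List.pyRange (max 0 (p - m.length + 1)) (min p ((m.length : Int) - 1) + 1) 1).map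
        (fun q => diagIdx m ((m.length : Int) - p + q - 1) q)) 4)) = false := by
  rw [List.any_eq_false]
  intro p hp
  rw [PySem.List.mem_pyRange_one] at hp
  have ha0 : (0 : Int) ≤ max 0 (p - m.length + 1) := le_max_left _ _
  have hbn : min p ((m.length : Int) - 1) ≤ (m.length : Int) - 1 := min_le_right _ _
  have hlen : ∀ g : Int → Int,
      ((PySem.List.pyRange (max 0 (p - m.length + 1)) (min p ((m.length : Int) - 1) + 1) 1).map g).length < 4 := by
    intro g
    simp only [List.length_map, PySem.List.length_pyRange_one]
    omega
  rw [hasNSeq_short _ (hlen _), hasNSeq_short _ (hlen _), Bool.or_self]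
  simp

-- ===== VERDICT (by name: the statement is the Claim_ definition above) =====
theorem checkio2_spec : Claim_equal_checkio2 := by
  intro m _ hpre
  unfold Spec_checkio2
  rw [Bool.eq_iff_iff]
  simp only [checkio2, Bool.or_eq_true]
  rcases hpre with ⟨hrect, hWn⟩ | ⟨hn, -⟩
  · rw [rows_iff m, cols_iff m _ hrect, diags_iff m _ hrect hWn, alt_iff m _ hrect hWn]
    constructor
    · rintro ((h | h) | (h | h))
      · exact Or.inl h
      · exact Or.inr (Or.inl h)
      · exact Or.inr (Or.inr (Or.inr h))
      · exact Or.inr (Or.inr (Or.inl h))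
    · rintro (h | h | h | h)
      · exact Or.inl (Or.inl h)
      · exact Or.inl (Or.inr h)
      · exact Or.inr (Or.inr h)
      · exact Or.inr (Or.inl h)
  · rw [cols_false m hn, diags_false m hn, rows_iff m, alt_iff_small m hn]
    simp
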